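-- pv_equiv track=rewrite | github.com/diegogerwig/advent_of_code | 2025/05/advent_2025_05.py | count_fresh_ids_from_ranges
-- ===== SOURCE A (Python) =====
-- def merge_ranges(ranges):
--     """
--     Merge overlapping ranges to get non-overlapping ranges.
--     Returns a list of merged ranges.
--     """
--     if not ranges:
--         return []
--
--     # Sort ranges by start value
--     sorted_ranges = sorted(ranges, key=lambda x: x[0])
--
--     merged = []
--     current_start, current_end = sorted_ranges[0]
--
--     for start, end in sorted_ranges[1:]:
--         if start <= current_end + 1:  # Ranges overlap or are adjacent
--             current_end = max(current_end, end)
--         else: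
--             merged.append((current_start, current_end))
--             current_start, current_end = start, end
--
--     merged.append((current_start, current_end))
--     return merged
--
-- def count_fresh_ids_from_ranges(ranges):
--     """
--     Count all unique ingredient IDs that are within any range.
--     """
--     if not ranges:
--         return 0
--
--     # Merge ranges to avoid counting overlaps multiple times
--     merged = merge_ranges(ranges)
--
--     # Count total IDs in all merged ranges
--     total = 0
--     for start, end in merged:
--         total += (end - start + 1)
--
--     return total
-- ===== SOURCE B (Python) =====
-- def count_fresh_ids_from_ranges(ranges):
--     """
--     Count all unique ingredient IDs that are within any range.
--     Span-minus-gaps: sort by start, one pass keeping the running group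
--     maximum end; subtract every gap between groups from the overall span.
--     """
--     if not ranges:
--         return 0
--     rs = sorted(ranges, key=lambda x: x[0])
--     m = rs[0][1]
--     gaps = 0
--     for s, e in rs[1:]:
--         if s > m + 1:
--             gaps += s - m - 1
--             m = e
--         else:
--             m = max(m, e)
--     return m - rs[0][0] + 1 - gaps
-- ===== Notes on version B (the rewrite author's own statement) =====
-- stated objective: simpler
-- what changed: B replaces A's two-phase merge (build a list of merged intervals, then sum their lengths) with a single sweep over the sorted ranges that tracks the running group maximum end and subtracts the gaps between groups from the overall span, building no intermediate list.
import Mathlib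
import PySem

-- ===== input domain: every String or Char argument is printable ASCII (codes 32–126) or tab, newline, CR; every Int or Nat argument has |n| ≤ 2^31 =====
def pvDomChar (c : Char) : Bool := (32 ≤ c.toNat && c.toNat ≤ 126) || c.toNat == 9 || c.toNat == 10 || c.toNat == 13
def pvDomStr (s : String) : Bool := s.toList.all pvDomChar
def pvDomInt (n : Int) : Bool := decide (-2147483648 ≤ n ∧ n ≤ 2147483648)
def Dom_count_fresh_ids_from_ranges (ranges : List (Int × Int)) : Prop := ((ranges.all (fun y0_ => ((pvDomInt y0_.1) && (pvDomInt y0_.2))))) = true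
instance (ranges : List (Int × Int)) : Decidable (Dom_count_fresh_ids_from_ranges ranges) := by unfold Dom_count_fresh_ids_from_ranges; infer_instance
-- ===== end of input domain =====

-- B replaces A's merge-list-then-sum with a single sorted sweep that subtracts the
-- gaps between groups from the overall span (simpler: one pass, no intermediate list).

-- ===== PORT A =====
-- loop of merge_ranges: state (current_start, current_end, merged)
def pvMergeLoop : List (Int × Int) → Int → Int → List (Int × Int) → List (Int × Int)
  | [], cs, ce, merged => merged ++ [(cs, ce)]
  | (s, e) :: t, cs, ce, merged =>
      if s ≤ ce + 1 then pvMergeLoop t cs (max ce e) merged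
      else pvMergeLoop t s e (merged ++ [(cs, ce)])

def merge_ranges (ranges : List (Int × Int)) : List (Int × Int) :=
  if ranges = [] then []
  else
    match PySem.List.sorted ranges (fun x => x.1) false with
    | [] => []  -- unreachable: sorted of a non-empty list is non-empty
    | (cs, ce) :: rest => pvMergeLoop rest cs ce []

def count_fresh_ids_from_ranges (ranges : List (Int × Int)) : Int :=
  if ranges = [] then 0
  else (merge_ranges ranges).foldl (fun total p => total + (p.2 - p.1 + 1)) 0

-- ===== PORT B =====
-- one sweep step over the sorted tail: state (running group max end m, gap total)
def pvGapStep (st : Int × Int) (p : Int × Int) : Int × Int :=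
  if p.1 > st.1 + 1 then (p.2, st.2 + p.1 - st.1 - 1) else (max st.1 p.2, st.2)

def count_fresh_ids_from_ranges_alt (ranges : List (Int × Int)) : Int :=
  if ranges = [] then 0
  else
    match PySem.List.sorted ranges (fun x => x.1) false with
    | [] => 0  -- unreachable
    | (s0, e0) :: rest =>
        let st := rest.foldl pvGapStep (e0, 0)
        st.1 - s0 + 1 - st.2

-- ===== PRECONDITION & SPEC =====
def Spec_count_fresh_ids_from_ranges (ranges : List (Int × Int)) (out : Int) : Prop := out = count_fresh_ids_from_ranges_alt ranges
instance (ranges : List (Int × Int)) (out : Int) : Decidable (Spec_count_fresh_ids_from_ranges ranges out) := by unfold Spec_count_fresh_ids_from_ranges; infer_instance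

-- ===== CLAIM (what is proved, stated in full; the proofs are below) =====
def Claim_equal_count_fresh_ids_from_ranges : Prop := ∀ (ranges : List (Int × Int)), Dom_count_fresh_ids_from_ranges ranges → Spec_count_fresh_ids_from_ranges ranges (count_fresh_ids_from_ranges ranges)

-- ===== LEMMAS AND PROOFS =====

-- the gap accumulator of B's fold is additive in its initial value
theorem pvGapStep_add (l : List (Int × Int)) : ∀ (m g : Int),
    l.foldl pvGapStep (m, g) = ((l.foldl pvGapStep (m, 0)).1, g + (l.foldl pvGapStep (m, 0)).2) := by
  induction l with
  | nil => intro m g; simp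
  | cons p t ih =>
      intro m g
      simp only [List.foldl_cons, pvGapStep]
      split_ifs with h
      · rw [ih p.2 (g + p.1 - m - 1), ih p.2 (0 + p.1 - m - 1)]
        simp only [Prod.mk.injEq, true_and]
        ring
      · rw [ih (max m p.2) g, ih (max m p.2) 0]

-- A's total over the merged groups equals B's span-minus-gaps formula
theorem pvMain (l : List (Int × Int)) : ∀ (cs ce : Int) (merged : List (Int × Int)),
    (pvMergeLoop l cs ce merged).foldl (fun total p => total + (p.2 - p.1 + 1)) 0
      = merged.foldl (fun total p => total + (p.2 - p.1 + 1)) 0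
        + ((l.foldl pvGapStep (ce, 0)).1 - cs + 1 - (l.foldl pvGapStep (ce, 0)).2) := by
  induction l with
  | nil =>
      intro cs ce merged
      simp [pvMergeLoop, List.foldl_append]
  | cons p t ih =>
      intro cs ce merged
      obtain ⟨s, e⟩ := p
      simp only [pvMergeLoop, List.foldl_cons, pvGapStep]
      by_cases h : s ≤ ce + 1
      · have h' : ¬ (s > ce + 1) := by omega
        simp only [h, if_true, h', if_false]
        exact ih cs (max ce e) merged
      · have h' : s > ce + 1 := by omega
        simp only [h, if_false, h', if_true]
        rw [ih s e (merged ++ [(cs, ce)]), pvGapStep_add t e (0 + s - ce - 1)]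
        simp [List.foldl_append]
        ring

-- ===== VERDICT (by name: the statement is the Claim_ definition above) =====
theorem count_fresh_ids_from_ranges_spec : Claim_equal_count_fresh_ids_from_ranges := by
  unfold Claim_equal_count_fresh_ids_from_ranges Spec_count_fresh_ids_from_ranges
  intro ranges _
  unfold count_fresh_ids_from_ranges count_fresh_ids_from_ranges_alt merge_ranges
  by_cases h : ranges = []
  · simp [h]
  · simp only [h, if_false]
    cases hs : PySem.List.sorted ranges (fun x => x.1) false with
    | nil => simp
    | cons p rest =>
        obtain ⟨cs, ce⟩ := p
        simpa using pvMain rest cs ce []
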